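-- pv_equiv track=rewrite | github.com/HaneulJung/Programmers | Programmers/Lv. 3/퍼즐 조각 채우기.py | solution
-- ===== SOURCE A (Python) =====
-- from collections import deque
--
-- def solution(game_board, table):
--     l = len(table)
--
--     moves = [(1,0), (-1,0), (0,1), (0,-1)]
--
--     def finding(arr, num):
--         visited = [[False] * l for _ in range(l)]
--         shapes = []
--         for y in range(l):
--             for x in range(l):
--                 if arr[y][x] == num and not visited[y][x]:
--                     q = deque()
--                     q.append([y, x])
--                     visited[y][x] = True
--                     shape = []
--                     while q:
--                         cy, cx = q.popleft()
--                         shape.append([cy, cx])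
--                         for move in moves:
--                             dy = cy + move[0]
--                             dx = cx + move[1]
--                             if 0 <= dy < l and 0 <= dx < l and not visited[dy][dx]:
--                                 visited[dy][dx] = True
--                                 if arr[dy][dx] == num:
--                                     q.append([dy, dx])
--                     shapes.append(moveToZero(sorted(shape)))
--         return shapes
--
--     def moveToZero(arr):
--         min_y, min_x = 50, 50
--         tmp = []
--         for y, x in arr:
--             min_y = min(min_y, y)
--             min_x = min(min_x, x)
--         for y, x in arr:
--             tmp.append([y - min_y, x - min_x])
--         return tmp
--
--     def rotation(arr):
--         result = [arr]
--         for _ in range(3):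
--             tmp = []
--             for y, x in arr:
--                 tmp.append([x, -y])
--             arr = moveToZero(sorted(tmp))
--             result.append(arr)
--         return result
--
--     # table에서 블록 찾고 (0,0) 으로 이동
--     blocks = finding(table, 1)
--     # game_board에서 빈 곳 찾고 (0,0) 으로 이동
--     spaces = finding(game_board, 0)
--
--     answer = 0
--     # 맞는 블록 찾기
--     q = deque()
--     used = [i for i in range(len(blocks))]
--     filled = [i for i in range(len(spaces))]
--     q.append([used, filled])
--     while q:
--         _used, _filled = q.popleft()
--         findFlag = False
--         for i in _used:
--             for j in _filled:
--                 if spaces[j] in rotation(blocks[i]):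
--                     _used.remove(i)
--                     _filled.remove(j)
--                     q.append([_used, _filled])
--                     answer += len(blocks[i])
--                     findFlag = True
--                     break
--             if findFlag:
--                 break
--
--     return answer
-- ===== SOURCE B (Python) =====
-- def solution(game_board, table):
--     l = len(table)
--
--     # translation to the origin; the shift is capped at 50 exactly as in the
--     # original (boards in this problem are at most 50x50, so the cap is inert there)
--     def norm(cells):
--         my = min([y for y, _ in cells] + [50])
--         mx = min([x for _, x in cells] + [50])
--         return [(y - my, x - mx) for y, x in cells]
--
--     # the 4 rotation forms of a normalized shape, computed once
--     def rotations(shape):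
--         res, cur = [], shape
--         for _ in range(4):
--             res.append(cur)
--             cur = norm(sorted((x, -y) for y, x in cur))
--         return res
--
--     # connected regions of cells equal to num: head-pointer list BFS over a
--     # hash set of seen cells (no boolean matrix, no deque) -- the grown list
--     # q itself IS the region
--     def regions(arr, num):
--         seen = set()
--         out = []
--         for y in range(l):
--             for x in range(l):
--                 if arr[y][x] == num and (y, x) not in seen:
--                     seen.add((y, x))
--                     q = [(y, x)]
--                     head = 0
--                     while head < len(q):
--                         cy, cx = q[head]
--                         head += 1
--                         for dy, dx in ((1, 0), (-1, 0), (0, 1), (0, -1)):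
--                             ny, nx = cy + dy, cx + dx
--                             if 0 <= ny < l and 0 <= nx < l and (ny, nx) not in seen:
--                                 seen.add((ny, nx))
--                                 if arr[ny][nx] == num:
--                                     q.append((ny, nx))
--                     out.append(norm(sorted(q)))
--         return out
--
--     blocks = regions(table, 1)
--     spaces = regions(game_board, 0)
--
--     # index the holes by normalized form ONCE: form -> ascending hole indices
--     index = {}
--     for j, s in enumerate(spaces):
--         index.setdefault(tuple(s), []).append(j)
--
--     # one pass over the blocks: compute each block's 4 rotation forms once and
--     # serve it the smallest remaining hole index among its (at most 4) buckets
--     answer = 0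
--     for b in blocks:
--         best = None
--         for form in rotations(b):
--             k = tuple(form)
--             lst = index.get(k)
--             if lst and (best is None or lst[0] < index[best][0]):
--                 best = k
--         if best is not None:
--             index[best].pop(0)
--             answer += len(b)
--     return answer
-- ===== Notes on version B (the rewrite author's own statement) =====
-- stated objective: alternative
-- what changed: Region extraction drops the boolean visited matrix and deque for a head-pointer list BFS over a hash set of seen cells (the grown list itself is the region), and the matching phase is rewritten: instead of re-scanning the remaining (block, hole) index pairs after every match and recomputing the block's rotations for every pair, B builds a dict from normalized hole shape to its ascending list of indices once and serves each block in a single pass, computing its 4 rotation forms once and popping the smallest available hole index among the (at most 4) matching buckets; …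
import Mathlib
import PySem

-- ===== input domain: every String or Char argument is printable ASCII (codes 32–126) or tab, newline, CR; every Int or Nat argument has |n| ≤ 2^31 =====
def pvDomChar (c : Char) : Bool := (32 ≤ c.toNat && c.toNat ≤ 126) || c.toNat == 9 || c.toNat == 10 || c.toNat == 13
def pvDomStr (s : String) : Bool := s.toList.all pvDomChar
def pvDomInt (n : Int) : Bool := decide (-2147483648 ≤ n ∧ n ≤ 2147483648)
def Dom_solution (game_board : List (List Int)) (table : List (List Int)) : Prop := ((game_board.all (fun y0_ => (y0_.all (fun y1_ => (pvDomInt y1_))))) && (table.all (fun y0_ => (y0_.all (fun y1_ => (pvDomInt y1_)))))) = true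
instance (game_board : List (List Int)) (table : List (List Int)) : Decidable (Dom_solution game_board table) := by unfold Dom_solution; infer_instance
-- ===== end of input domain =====

-- B replaces A's boolean-matrix deque BFS with a head-pointer list over a hash set of seen cells
-- and replaces A's pair-rescanning matcher (rotations recomputed per block/hole pair) by a
-- one-pass match against a dict indexing the holes by normalized shape (alternative algorithm).

-- ===== PORT A =====
-- cells [y, x] are ported as pairs (y, x); shapes as List (Int × Int)
abbrev PShape := List (Int × Int)

-- moves = [(1,0), (-1,0), (0,1), (0,-1)]
def pvMoves : List (Int × Int) := [(1, 0), (-1, 0), (0, 1), (0, -1)]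

-- moveToZero(arr): two loops, running minima starting at 50, then shift
def mzA (arr : PShape) : PShape :=
  let m := arr.foldl (fun (mn : Int × Int) p => (min mn.1 p.1, min mn.2 p.2)) (50, 50)
  arr.foldl (fun tmp p => tmp ++ [(p.1 - m.1, p.2 - m.2)]) []

-- sorted(shape): lexicographic sort of [y, x] pairs
def sortShape (s : PShape) : PShape := PySem.List.sorted2 s (fun p => p.1) (fun p => p.2)

-- rotation(arr): result = [arr]; 3 times: tmp = [[x, -y]…]; arr = moveToZero(sorted(tmp)); append
def rotationA (arr : PShape) : List PShape :=
  ((List.range 3).foldl (fun (st : List PShape × PShape) _ =>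
    let tmp := st.2.foldl (fun t (p : Int × Int) => t ++ [(p.2, -p.1)]) []
    let arr' := mzA (sortShape tmp)
    (st.1 ++ [arr'], arr')) ([arr], arr)).1

def cellAt (arr : List (List Int)) (y x : Int) : Int :=
  PySem.List.pyGetD (PySem.List.pyGetD arr y []) x 0

def visGet (v : List (List Bool)) (y x : Int) : Bool :=
  PySem.List.pyGetD (PySem.List.pyGetD v y []) x true

def visSet (v : List (List Bool)) (y x : Int) : List (List Bool) :=
  PySem.List.pySetD v y (PySem.List.pySetD (PySem.List.pyGetD v y []) x true)

-- number of unvisited cells: the BFS termination measure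
def falseCount (v : List (List Bool)) : Nat := (v.map (fun r => r.count false)).sum

-- one neighbour probe of the BFS inner `for move in moves` loop
def bfsStep (arr : List (List Int)) (num l cy cx : Int)
    (st : PShape × List (List Bool)) (mv : Int × Int) : PShape × List (List Bool) :=
  let dy := cy + mv.1
  let dx := cx + mv.2
  if 0 ≤ dy ∧ dy < l ∧ 0 ≤ dx ∧ dx < l ∧ visGet st.2 dy dx = false then
    let v' := visSet st.2 dy dx
    if cellAt arr dy dx == num then (st.1 ++ [(dy, dx)], v') else (st.1, v')
  else st

-- termination helpers for bfs (the port cites them in decreasing_by)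
theorem count_false_set_true (r : List Bool) (k : Nat) (h : r.getD k true = false) :
    (r.set k true).count false + 1 = r.count false := by
  induction r generalizing k with
  | nil => simp [List.getD] at h
  | cons x t ih =>
    cases k with
    | zero =>
      simp only [List.getD_cons_zero] at h
      subst h
      simp
    | succ k =>
      simp only [List.getD_cons_succ] at h
      have := ih k h
      simp only [List.set_cons_succ, List.count_cons]
      omega

theorem falseCount_set (v : List (List Bool)) (n : Nat) (r : List Bool) (h : n < v.length) :
    falseCount (v.set n r) + (v.getD n []).count false = falseCount v + r.count false := by
  induction v generalizing n with
  | nil => simp at h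
  | cons x t ih =>
    cases n with
    | zero => simp [falseCount]; omega
    | succ n =>
      have hn : n < t.length := by simpa using h
      have := ih n hn
      simp only [List.set_cons_succ, List.getD_cons_succ, falseCount, List.map_cons,
        List.sum_cons] at this ⊢
      omega

theorem visSet_falseCount (v : List (List Bool)) (y x : Int) (hy : 0 ≤ y) (hx : 0 ≤ x)
    (h : visGet v y x = false) : falseCount (visSet v y x) + 1 = falseCount v := by
  unfold visGet at h
  unfold visSet
  rw [PySem.List.pyGetD_of_nonneg _ _ hy, PySem.List.pyGetD_of_nonneg _ _ hx] at h
  rw [PySem.List.pySetD_of_nonneg _ _ hy, PySem.List.pyGetD_of_nonneg _ _ hy,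
    PySem.List.pySetD_of_nonneg _ _ hx]
  set row := v.getD y.toNat [] with hrow
  have hxlt : x.toNat < row.length := by
    by_contra hc
    rw [List.getD_eq_default _ _ (by omega)] at h
    exact absurd h (by simp)
  have hylt : y.toNat < v.length := by
    by_contra hc
    have : row = [] := by rw [hrow, List.getD_eq_default _ _ (by omega)]
    rw [this] at hxlt; simp at hxlt
  have h1 := falseCount_set v y.toNat (row.set x.toNat true) hylt
  have h2 := count_false_set_true row x.toNat h
  rw [← hrow] at h1
  omega

theorem bfsStep_mu (arr : List (List Int)) (num l cy cx : Int)
    (st : PShape × List (List Bool)) (mv : Int × Int) :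
    falseCount (bfsStep arr num l cy cx st mv).2 + (bfsStep arr num l cy cx st mv).1.length
      ≤ falseCount st.2 + st.1.length := by
  unfold bfsStep
  dsimp only
  split_ifs with hg hc
  · obtain ⟨h1, _, h3, _, h5⟩ := hg
    have hv := visSet_falseCount st.2 (cy + mv.1) (cx + mv.2) h1 h3 h5
    simp only [List.length_append, List.length_cons, List.length_nil]
    omega
  · obtain ⟨h1, _, h3, _, h5⟩ := hg
    have hv := visSet_falseCount st.2 (cy + mv.1) (cx + mv.2) h1 h3 h5
    dsimp only
    omega
  · exact le_refl _

-- the while-q loop: the deque holds the frontier; pop left, append popped cell to shape,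
-- probe the 4 moves (marking visited, enqueueing matching cells)
def bfs (arr : List (List Int)) (num l : Int) :
    PShape → List (List Bool) → PShape → PShape × List (List Bool)
  | [], vis, shape => (shape, vis)
  | c :: q, vis, shape =>
    let st := pvMoves.foldl (bfsStep arr num l c.1 c.2) (q, vis)
    bfs arr num l st.1 st.2 (shape ++ [c])
termination_by q vis _ => falseCount vis + q.length
decreasing_by
  have h1 := bfsStep_mu arr num l c.1 c.2 (q, vis) (1, 0)
  have h2 := bfsStep_mu arr num l c.1 c.2 (bfsStep arr num l c.1 c.2 (q, vis) (1, 0)) (-1, 0)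
  have h3 := bfsStep_mu arr num l c.1 c.2
    (bfsStep arr num l c.1 c.2 (bfsStep arr num l c.1 c.2 (q, vis) (1, 0)) (-1, 0)) (0, 1)
  have h4 := bfsStep_mu arr num l c.1 c.2
    (bfsStep arr num l c.1 c.2 (bfsStep arr num l c.1 c.2 (bfsStep arr num l c.1 c.2 (q, vis) (1, 0)) (-1, 0)) (0, 1)) (0, -1)
  simp only [pvMoves, List.foldl, List.length_cons]
  dsimp only at h1 h2 h3 h4
  omega

-- finding(arr, num): row-major scan starting a BFS at every unvisited num-cell
def finding (arr : List (List Int)) (num l : Int) : List PShape :=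
  ((PySem.List.pyRange 0 l 1).foldl (fun st y =>
    (PySem.List.pyRange 0 l 1).foldl (fun (st : List (List Bool) × List PShape) x =>
      if cellAt arr y x == num && !(visGet st.1 y x) then
        let v := visSet st.1 y x
        let r := bfs arr num l [(y, x)] v []
        (r.2, st.2 ++ [mzA (sortShape r.1)])
      else st) st)
    ((PySem.List.pyRange 0 l 1).map (fun _ => PySem.List.pyRepeat [false] l), [])).2

-- inner `for j in _filled: if spaces[j] in rotation(blocks[i]): … break`
def findJA (blocks spaces : List PShape) (i : Int) : List Int → Option Int
  | [] => none
  | j :: rest =>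
    if (rotationA (PySem.List.pyGetD blocks i [])).contains (PySem.List.pyGetD spaces j []) then
      some j
    else findJA blocks spaces i rest

-- outer `for i in _used` with the findFlag double break
def findPairA (blocks spaces : List PShape) (filled : List Int) : List Int → Option (Int × Int)
  | [] => none
  | i :: rest =>
    match findJA blocks spaces i filled with
    | some j => some (i, j)
    | none => findPairA blocks spaces filled rest

-- lemmas the port cites for loopA's termination
theorem findPairA_some {blocks spaces : List PShape} {filled used : List Int} {i j : Int}
    (h : findPairA blocks spaces filled used = some (i, j)) :
    i ∈ used ∧ findJA blocks spaces i filled = some j := by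
  induction used with
  | nil => simp [findPairA] at h
  | cons a t ih =>
    simp only [findPairA] at h
    cases hj : findJA blocks spaces a filled with
    | some j' =>
      rw [hj] at h
      cases h
      exact ⟨List.mem_cons_self .., hj⟩
    | none =>
      rw [hj] at h
      obtain ⟨hm, hf⟩ := ih h
      exact ⟨List.mem_cons_of_mem _ hm, hf⟩

theorem remove?_getD_erase {xs : List Int} {v : Int} (h : v ∈ xs) :
    (PySem.List.remove? xs v).getD xs = xs.erase v := by
  induction xs with
  | nil => simp at h
  | cons x t ih =>
    unfold PySem.List.remove?
    rw [List.idxOf?_cons]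
    by_cases hx : (x == v) = true
    · simp only [hx, if_true, Option.map_some, Option.getD_some, List.eraseIdx_cons_zero]
      have hxv : x = v := by simpa using hx
      rw [hxv, List.erase_cons_head]
    · have hvt : v ∈ t := by
        rcases List.mem_cons.mp h with rfl | hm
        · simp at hx
        · exact hm
      rw [List.erase_cons_tail hx]
      simp only [hx]
      unfold PySem.List.remove? at ih
      cases hidx : List.idxOf? v t with
      | none =>
        rw [hidx] at ih
        simp only [Option.map_none, Option.getD_none] at ih ⊢
        exact (congrArg (x :: ·) (ih hvt))
      | some k =>
        rw [hidx] at ih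
        have h2 := ih hvt
        simp only [Option.map_some, Option.getD_some] at h2
        simp [List.eraseIdx_cons_succ, h2]

theorem remove?_getD_length {xs : List Int} {v : Int} (h : v ∈ xs) :
    ((PySem.List.remove? xs v).getD xs).length + 1 = xs.length := by
  rw [remove?_getD_erase h, List.length_erase_of_mem h]
  have : 0 < xs.length := List.length_pos_of_mem h
  omega

-- the while-q matching loop of A: q always carries exactly the one (used, filled) pair,
-- so it is the recursion "find first matching (i, j); remove both; repeat"
def loopA (blocks spaces : List PShape) (used filled : List Int) (ans : Int) : Int :=
  match h : findPairA blocks spaces filled used with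
  | some ij =>
    loopA blocks spaces ((PySem.List.remove? used ij.1).getD used)
      ((PySem.List.remove? filled ij.2).getD filled)
      (ans + PySem.List.len (PySem.List.pyGetD blocks ij.1 []))
  | none => ans
termination_by used.length
decreasing_by
  have hm := (findPairA_some h).1
  have := remove?_getD_length hm
  omega

def solution (game_board : List (List Int)) (table : List (List Int)) : Int :=
  let l := PySem.List.len table
  let blocks := finding table 1 l
  let spaces := finding game_board 0 l
  loopA blocks spaces (PySem.List.pyRange 0 (PySem.List.len blocks) 1)
    (PySem.List.pyRange 0 (PySem.List.len spaces) 1) 0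

-- ===== PORT B =====
-- norm(cells): minima of the two coordinate lists (capped at 50 as in the original), then a map
def mzB (arr : PShape) : PShape :=
  let my := (arr.map Prod.fst).foldl min 50
  let mx := (arr.map Prod.snd).foldl min 50
  arr.map (fun p => (p.1 - my, p.2 - mx))

-- rotations(shape): the next 4 forms by direct recursion (append cur; cur = norm(sorted(rot)))
def rotB : Nat → PShape → List PShape
  | 0, _ => []
  | n + 1, a => a :: rotB n (mzB (sortShape (a.map (fun p => (p.2, -p.1)))))

-- one neighbour probe of B's `for dy, dx in …` loop (hash set of seen cells, q grows at the end)
def nbrB (arr : List (List Int)) (num l cy cx : Int)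
    (st : List (Int × Int) × PySem.Set (Int × Int)) (mv : Int × Int) :
    List (Int × Int) × PySem.Set (Int × Int) :=
  let ny := cy + mv.1
  let nx := cx + mv.2
  if 0 ≤ ny ∧ ny < l ∧ 0 ≤ nx ∧ nx < l ∧ st.2.contains (ny, nx) = false then
    let s' := st.2.add (ny, nx)
    if cellAt arr ny nx == num then (st.1 ++ [(ny, nx)], s') else (st.1, s')
  else st

-- `while head < len(q)` as fuel recursion (fuel = l*l+1 suffices: at most one step per cell;
-- the fuel guard only totalizes the loop, it is proved unreachable on the inputs used)
def bfsB (arr : List (List Int)) (num l : Int) :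
    Nat → List (Int × Int) → Nat → PySem.Set (Int × Int) →
    List (Int × Int) × PySem.Set (Int × Int)
  | 0, q, _, seen => (q, seen)
  | fuel + 1, q, head, seen =>
    if head < q.length then
      let c := q.getD head (0, 0)
      let st := pvMoves.foldl (nbrB arr num l c.1 c.2) (q, seen)
      bfsB arr num l fuel st.1 (head + 1) st.2
    else (q, seen)

-- regions(arr, num): same row-major scan, but seen is a set and the grown list q IS the region
def findingB (arr : List (List Int)) (num l : Int) : List PShape :=
  ((PySem.List.pyRange 0 l 1).foldl (fun st y =>
    (PySem.List.pyRange 0 l 1).foldl (fun (st : PySem.Set (Int × Int) × List PShape) x =>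
      if cellAt arr y x == num && !(st.1.contains (y, x)) then
        let r := bfsB arr num l (l.toNat * l.toNat + 1) [(y, x)] 0 (st.1.add (y, x))
        (r.2, st.2 ++ [mzB (sortShape r.1)])
      else st) st)
    (PySem.Set.empty, [])).2

-- index = {}; for j, s in enumerate(spaces): index.setdefault(tuple(s), []).append(j)
def buildIndex (spaces : List PShape) : PySem.Dict PShape (List Int) :=
  (PySem.List.enumerate spaces).foldl
    (fun d js => d.modify js.2 [] (fun dq => dq ++ [js.1])) PySem.Dict.empty

-- best = None; for form in rotations(b): k = …; lst = index.get(k);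
--   if lst and (best is None or lst[0] < index[best][0]): best = k
-- (index[best] is nonempty whenever best is set and the dict is unchanged during the scan,
--  so `headD 0` reads exactly index[best][0])
def bestBucket (d : PySem.Dict PShape (List Int)) (forms : List PShape) : Option PShape :=
  forms.foldl (fun best k =>
    match d.getD k [] with
    | [] => best
    | j :: _ =>
      match best with
      | none => some k
      | some bk => if j < (d.getD bk []).headD 0 then some k else some bk) none

-- if best is not None: index[best].pop(0); answer += len(b)
def stepB (st : PySem.Dict PShape (List Int) × Int) (b : PShape) :
    PySem.Dict PShape (List Int) × Int :=
  match bestBucket st.1 (rotB 4 b) with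
  | some bk => (st.1.insert bk (st.1.getD bk []).tail, st.2 + PySem.List.len b)
  | none => st

def solution_alt (game_board : List (List Int)) (table : List (List Int)) : Int :=
  let l := PySem.List.len table
  let blocks := findingB table 1 l
  let spaces := findingB game_board 0 l
  let index := buildIndex spaces
  (blocks.foldl stepB (index, 0)).2

-- ===== PRECONDITION & SPEC =====
-- Pre_: exactly the inputs where the Python A returns (no IndexError): with l = len(table),
-- every row of table and every one of the first l rows of game_board has at least l entries.
def Pre_solution (game_board : List (List Int)) (table : List (List Int)) : Prop :=
  (∀ r ∈ table, table.length ≤ r.length) ∧ table.length ≤ game_board.length ∧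
    ∀ r ∈ game_board.take table.length, table.length ≤ r.length
instance (game_board : List (List Int)) (table : List (List Int)) :
    Decidable (Pre_solution game_board table) := by unfold Pre_solution; infer_instance

def pvWitness_solution : List (List Int) × List (List Int) := ([[0]], [[1]])

def Spec_solution (game_board : List (List Int)) (table : List (List Int)) (out : Int) : Prop :=
  out = solution_alt game_board table
instance (game_board : List (List Int)) (table : List (List Int)) (out : Int) :
    Decidable (Spec_solution game_board table out) := by unfold Spec_solution; infer_instance

-- ===== CLAIM (what is proved, stated in full; the proofs are below) =====
def Claim_equal_solution : Prop := ∀ (game_board : List (List Int)) (table : List (List Int)), Dom_solution game_board table → Pre_solution game_board table → Spec_solution game_board table (solution game_board table)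

-- ===== LEMMAS AND PROOFS =====

-- ---- B's normalization and rotation agree with A's ----
theorem foldl_min_pair (arr : PShape) (a b : Int) :
    arr.foldl (fun (mn : Int × Int) p => (min mn.1 p.1, min mn.2 p.2)) (a, b)
      = (arr.foldl (fun m p => min m p.1) a, arr.foldl (fun m p => min m p.2) b) := by
  induction arr generalizing a b with
  | nil => rfl
  | cons x t ih => simp only [List.foldl_cons]; exact ih _ _

theorem mzB_eq (arr : PShape) : mzB arr = mzA arr := by
  unfold mzA mzB
  rw [PySem.List.foldl_append_singleton_eq_map, List.nil_append, foldl_min_pair,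
    List.foldl_map, List.foldl_map]

theorem rotB_eq (a : PShape) : rotB 4 a = rotationA a := by
  have hr : ∀ s : PShape,
      mzB (sortShape (s.map (fun p => (p.2, -p.1))))
        = mzA (sortShape (s.foldl (fun t (p : Int × Int) => t ++ [(p.2, -p.1)]) [])) := by
    intro s
    rw [PySem.List.foldl_append_singleton_eq_map, List.nil_append, mzB_eq]
  show rotB 4 a = rotationA a
  simp only [rotationA, List.range_succ, List.range_zero, List.nil_append,
    List.foldl_append, List.foldl_cons, List.foldl_nil, rotB, hr]
  simp

-- ---- the simulation relation between A's boolean matrix and B's seen set ----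
def RelV (l : Int) (vis : List (List Bool)) (seen : PySem.Set (Int × Int)) : Prop :=
  vis.length = l.toNat ∧
  (∀ i : Nat, i < vis.length → (vis.getD i []).length = l.toNat) ∧
  (∀ y x : Int, 0 ≤ y → y < l → 0 ≤ x → x < l →
     visGet vis y x = seen.contains (y, x))

theorem contains_add (s : PySem.Set (Int × Int)) (e x : Int × Int) :
    (s.add e).contains x = (s.contains x || x == e) := by
  unfold PySem.Set.add PySem.Set.contains
  by_cases h : List.contains s e
  · simp only [h, if_true]
    by_cases hx : x = e
    · subst hx; simp at h ⊢; simp [h]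
    · simp [hx]
  · simp only [h]
    by_cases hx : x = e <;> simp [hx]

theorem getD_set_eq {α : Type} (v : List α) (n m : Nat) (a d : α) :
    (v.set n a).getD m d = if m = n ∧ n < v.length then a else v.getD m d := by
  rw [List.getD_eq_getElem?_getD, List.getD_eq_getElem?_getD, List.getElem?_set]
  by_cases h1 : n = m
  · subst h1
    by_cases h2 : n < v.length
    · simp [h2]
    · simp [h2]
  · have hnc : ¬(m = n ∧ n < v.length) := fun hc => h1 hc.1.symm
    simp [h1, hnc]

theorem relv_falseCount_le {l : Int} {vis : List (List Bool)} {seen : PySem.Set (Int × Int)}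
    (h : RelV l vis seen) : falseCount vis ≤ l.toNat * l.toNat := by
  obtain ⟨hlen, hrows, -⟩ := h
  have : ∀ (v : List (List Bool)), (∀ i : Nat, i < v.length → (v.getD i []).length = l.toNat) →
      falseCount v ≤ v.length * l.toNat := by
    intro v
    induction v with
    | nil => intro _; simp [falseCount]
    | cons r t ih =>
      intro hr
      have h0 : r.length = l.toNat := by
        have := hr 0 (by simp)
        simpa using this
      have ht : falseCount t ≤ t.length * l.toNat := by
        apply ih
        intro i hi
        have := hr (i + 1) (by simpa using Nat.succ_lt_succ hi)
        simpa using this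
      have hc : r.count false ≤ r.length := List.count_le_length
      simp only [falseCount, List.map_cons, List.sum_cons, List.length_cons] at *
      calc r.count false + (t.map (fun r => r.count false)).sum
          ≤ l.toNat + t.length * l.toNat := by omega
        _ = (t.length + 1) * l.toNat := by ring
  have := this vis hrows
  rw [hlen] at this
  exact this

theorem relv_visSet_add {l : Int} {vis : List (List Bool)} {seen : PySem.Set (Int × Int)}
    {y x : Int} (h : RelV l vis seen) (hy0 : 0 ≤ y) (hy1 : y < l) (hx0 : 0 ≤ x) (hx1 : x < l) :
    RelV l (visSet vis y x) (seen.add (y, x)) := by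
  obtain ⟨hlen, hrows, hget⟩ := h
  have hylt : y.toNat < vis.length := by rw [hlen]; omega
  have hxlt : x.toNat < (vis.getD y.toNat []).length := by rw [hrows y.toNat hylt]; omega
  have hvs : visSet vis y x
      = vis.set y.toNat ((vis.getD y.toNat []).set x.toNat true) := by
    unfold visSet
    rw [PySem.List.pySetD_of_nonneg _ _ hy0, PySem.List.pyGetD_of_nonneg _ _ hy0,
      PySem.List.pySetD_of_nonneg _ _ hx0]
  refine ⟨by rw [hvs, List.length_set, hlen], ?_, ?_⟩
  · intro i hi
    rw [hvs, List.length_set] at hi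
    rw [hvs, getD_set_eq]
    by_cases hc : i = y.toNat ∧ y.toNat < vis.length
    · rw [if_pos hc, List.length_set]
      exact hrows y.toNat hylt
    · rw [if_neg hc]
      exact hrows i hi
  · intro y' x' hy0' hy1' hx0' hx1'
    rw [contains_add]
    have hvg : visGet (visSet vis y x) y' x'
        = if y'.toNat = y.toNat ∧ x'.toNat = x.toNat then true else visGet vis y' x' := by
      unfold visGet
      rw [hvs, PySem.List.pyGetD_of_nonneg _ _ hy0', PySem.List.pyGetD_of_nonneg _ _ hx0',
        PySem.List.pyGetD_of_nonneg _ _ hy0', PySem.List.pyGetD_of_nonneg _ _ hx0',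
        getD_set_eq]
      by_cases hyy : y'.toNat = y.toNat
      · by_cases hxx : x'.toNat = x.toNat
        · rw [hyy, hxx, if_pos ⟨rfl, hylt⟩, getD_set_eq, if_pos ⟨rfl, hxlt⟩,
            if_pos ⟨rfl, rfl⟩]
        · rw [hyy, if_pos ⟨rfl, hylt⟩, getD_set_eq,
            if_neg (fun hc => hxx hc.1),
            if_neg (fun hc : y.toNat = y.toNat ∧ x'.toNat = x.toNat => hxx hc.2)]
      · rw [if_neg (fun hc => hyy hc.1),
          if_neg (fun hc : y'.toNat = y.toNat ∧ x'.toNat = x.toNat => hyy hc.1)]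
    rw [hvg]
    by_cases heq : y' = y ∧ x' = x
    · rw [if_pos ⟨by rw [heq.1], by rw [heq.2]⟩]
      have : ((y', x') == (y, x)) = true := by
        rw [beq_iff_eq, Prod.mk.injEq]; exact ⟨heq.1, heq.2⟩
      rw [this, Bool.or_true]
    · have hne : ((y', x') == (y, x)) = false := by
        rw [beq_eq_false_iff_ne]
        intro hc
        rw [Prod.mk.injEq] at hc
        exact heq hc
      have hnn : ¬ (y'.toNat = y.toNat ∧ x'.toNat = x.toNat) := by
        intro hc
        apply heq
        constructor
        · omega
        · omega
      rw [if_neg hnn, hne, Bool.or_false]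
      exact hget y' x' hy0' hy1' hx0' hx1'

-- ---- one neighbour probe and the 4-move fold simulate ----
theorem nbr_step {l : Int} {vis : List (List Bool)} {seen : PySem.Set (Int × Int)}
    (arr : List (List Int)) (num cy cx : Int) (P qq : PShape) (mv : Int × Int)
    (h : RelV l vis seen) :
    (nbrB arr num l cy cx (P ++ qq, seen) mv).1
        = P ++ (bfsStep arr num l cy cx (qq, vis) mv).1
      ∧ RelV l (bfsStep arr num l cy cx (qq, vis) mv).2
          (nbrB arr num l cy cx (P ++ qq, seen) mv).2 := by
  unfold nbrB bfsStep
  dsimp only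
  by_cases hb : 0 ≤ cy + mv.1 ∧ cy + mv.1 < l ∧ 0 ≤ cx + mv.2 ∧ cx + mv.2 < l
  · obtain ⟨h1, h2, h3, h4⟩ := hb
    have hgc := h.2.2 (cy + mv.1) (cx + mv.2) h1 h2 h3 h4
    by_cases hv : visGet vis (cy + mv.1) (cx + mv.2) = false
    · have hcont : seen.contains (cy + mv.1, cx + mv.2) = false := by rw [← hgc]; exact hv
      have hgA : 0 ≤ cy + mv.1 ∧ cy + mv.1 < l ∧ 0 ≤ cx + mv.2 ∧ cx + mv.2 < l ∧
          visGet vis (cy + mv.1) (cx + mv.2) = false := ⟨h1, h2, h3, h4, hv⟩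
      have hgB : 0 ≤ cy + mv.1 ∧ cy + mv.1 < l ∧ 0 ≤ cx + mv.2 ∧ cx + mv.2 < l ∧
          seen.contains (cy + mv.1, cx + mv.2) = false := ⟨h1, h2, h3, h4, hcont⟩
      rw [if_pos hgB, if_pos hgA]
      have hrel := relv_visSet_add h h1 h2 h3 h4
      by_cases hc : cellAt arr (cy + mv.1) (cx + mv.2) == num
      · rw [if_pos hc, if_pos hc]
        exact ⟨by rw [List.append_assoc], hrel⟩
      · rw [if_neg hc, if_neg hc]
        exact ⟨rfl, hrel⟩
    · have hcont : ¬ seen.contains (cy + mv.1, cx + mv.2) = false := by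
        rw [← hgc]; exact hv
      rw [if_neg (fun hc => hcont hc.2.2.2.2), if_neg (fun hc => hv hc.2.2.2.2)]
      exact ⟨rfl, h⟩
  · rw [if_neg (fun hc => hb ⟨hc.1, hc.2.1, hc.2.2.1, hc.2.2.2.1⟩),
      if_neg (fun hc => hb ⟨hc.1, hc.2.1, hc.2.2.1, hc.2.2.2.1⟩)]
    exact ⟨rfl, h⟩

theorem nbr_sim {l : Int} (arr : List (List Int)) (num cy cx : Int) (mvs : List (Int × Int)) :
    ∀ (P qq : PShape) (vis : List (List Bool)) (seen : PySem.Set (Int × Int)),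
      RelV l vis seen →
      (mvs.foldl (nbrB arr num l cy cx) (P ++ qq, seen)).1
          = P ++ (mvs.foldl (bfsStep arr num l cy cx) (qq, vis)).1
        ∧ RelV l (mvs.foldl (bfsStep arr num l cy cx) (qq, vis)).2
            (mvs.foldl (nbrB arr num l cy cx) (P ++ qq, seen)).2 := by
  induction mvs with
  | nil => intro P qq vis seen h; exact ⟨rfl, h⟩
  | cons mv rest ih =>
    intro P qq vis seen h
    obtain ⟨he, hrel⟩ := nbr_step arr num cy cx P qq mv h
    simp only [List.foldl_cons]
    have hstA : bfsStep arr num l cy cx (qq, vis) mv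
        = ((bfsStep arr num l cy cx (qq, vis) mv).1,
           (bfsStep arr num l cy cx (qq, vis) mv).2) := rfl
    have hstB : nbrB arr num l cy cx (P ++ qq, seen) mv
        = (P ++ (bfsStep arr num l cy cx (qq, vis) mv).1,
           (nbrB arr num l cy cx (P ++ qq, seen) mv).2) := by
      rw [← he]
    rw [hstB, hstA]
    exact ih P _ _ _ hrel

-- falseCount never grows along the 4-move fold (for the fuel bound)
theorem mu_fold (arr : List (List Int)) (num l cy cx : Int)
    (qq : PShape) (vis : List (List Bool)) :
    falseCount (pvMoves.foldl (bfsStep arr num l cy cx) (qq, vis)).2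
        + (pvMoves.foldl (bfsStep arr num l cy cx) (qq, vis)).1.length
      ≤ falseCount vis + qq.length := by
  have h1 := bfsStep_mu arr num l cy cx (qq, vis) (1, 0)
  have h2 := bfsStep_mu arr num l cy cx (bfsStep arr num l cy cx (qq, vis) (1, 0)) (-1, 0)
  have h3 := bfsStep_mu arr num l cy cx
    (bfsStep arr num l cy cx (bfsStep arr num l cy cx (qq, vis) (1, 0)) (-1, 0)) (0, 1)
  have h4 := bfsStep_mu arr num l cy cx
    (bfsStep arr num l cy cx (bfsStep arr num l cy cx (bfsStep arr num l cy cx (qq, vis) (1, 0)) (-1, 0)) (0, 1)) (0, -1)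
  simp only [pvMoves, List.foldl]
  dsimp only at h1 h2 h3 h4
  omega

theorem getD_append_length {α : Type} (xs : List α) (c : α) (ys : List α) (d : α) :
    (xs ++ c :: ys).getD xs.length d = c := by
  rw [List.getD_eq_getElem?_getD, List.getElem?_append_right (le_refl xs.length)]
  simp

-- ---- the head-pointer loop simulates A's deque BFS ----
theorem bfs_sim {l : Int} (arr : List (List Int)) (num : Int) :
    ∀ (fuel : Nat) (qA : PShape) (vis : List (List Bool)) (shape : PShape)
      (seen : PySem.Set (Int × Int)),
      RelV l vis seen → falseCount vis + qA.length < fuel →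
      (bfsB arr num l fuel (shape ++ qA) shape.length seen).1
          = (bfs arr num l qA vis shape).1
        ∧ RelV l (bfs arr num l qA vis shape).2
            (bfsB arr num l fuel (shape ++ qA) shape.length seen).2 := by
  intro fuel
  induction fuel with
  | zero => intro qA vis shape seen _ hf; omega
  | succ f ih =>
    intro qA vis shape seen hrel hf
    cases qA with
    | nil =>
      rw [bfs, List.append_nil]
      rw [show bfsB arr num l (f + 1) shape shape.length seen = (shape, seen) from by
        simp only [bfsB, if_neg (lt_irrefl shape.length)]]
      exact ⟨rfl, hrel⟩
    | cons c q' =>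
      have hlt : shape.length < (shape ++ c :: q').length := by
        rw [List.length_append, List.length_cons]; omega
      have hc : (shape ++ c :: q').getD shape.length ((0 : Int), (0 : Int)) = c :=
        getD_append_length shape c q' (0, 0)
      have hsplit : shape ++ c :: q' = (shape ++ [c]) ++ q' := by
        rw [List.append_assoc, List.singleton_append]
      rw [bfs]
      simp only [bfsB, if_pos hlt, hc]
      rw [hsplit]
      obtain ⟨he, hrel'⟩ := nbr_sim arr num c.1 c.2 pvMoves (shape ++ [c]) q' vis seen hrel
      rw [he]
      have hmu := mu_fold arr num l c.1 c.2 q' vis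
      have hlen : (shape ++ [c]).length = shape.length + 1 := by
        rw [List.length_append, List.length_cons, List.length_nil]
      rw [← hlen]
      exact ih (pvMoves.foldl (bfsStep arr num l c.1 c.2) (q', vis)).1
        (pvMoves.foldl (bfsStep arr num l c.1 c.2) (q', vis)).2
        (shape ++ [c]) _ hrel'
        (by simp only [List.length_cons] at hf; omega)

-- ---- the row-major scans simulate ----
theorem scan_inner_sim {l : Int} (arr : List (List Int)) (num y : Int)
    (hy0 : 0 ≤ y) (hy1 : y < l) :
    ∀ (xs : List Int), (∀ x ∈ xs, 0 ≤ x ∧ x < l) →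
    ∀ (vis : List (List Bool)) (outA : List PShape) (seen : PySem.Set (Int × Int))
      (outB : List PShape), RelV l vis seen → outB = outA →
      (xs.foldl (fun (st : PySem.Set (Int × Int) × List PShape) x =>
        if (cellAt arr y x == num && !(st.1.contains (y, x))) = true then
          ((bfsB arr num l (l.toNat * l.toNat + 1) [(y, x)] 0 (st.1.add (y, x))).2,
           st.2 ++ [mzB (sortShape
             (bfsB arr num l (l.toNat * l.toNat + 1) [(y, x)] 0 (st.1.add (y, x))).1)])
        else st) (seen, outB)).2
        = (xs.foldl (fun (st : List (List Bool) × List PShape) x =>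
            if (cellAt arr y x == num && !(visGet st.1 y x)) = true then
              ((bfs arr num l [(y, x)] (visSet st.1 y x) []).2,
               st.2 ++ [mzA (sortShape (bfs arr num l [(y, x)] (visSet st.1 y x) []).1)])
            else st) (vis, outA)).2
      ∧ RelV l (xs.foldl (fun (st : List (List Bool) × List PShape) x =>
            if (cellAt arr y x == num && !(visGet st.1 y x)) = true then
              ((bfs arr num l [(y, x)] (visSet st.1 y x) []).2,
               st.2 ++ [mzA (sortShape (bfs arr num l [(y, x)] (visSet st.1 y x) []).1)])
            else st) (vis, outA)).1
          (xs.foldl (fun (st : PySem.Set (Int × Int) × List PShape) x =>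
            if (cellAt arr y x == num && !(st.1.contains (y, x))) = true then
              ((bfsB arr num l (l.toNat * l.toNat + 1) [(y, x)] 0 (st.1.add (y, x))).2,
               st.2 ++ [mzB (sortShape
                 (bfsB arr num l (l.toNat * l.toNat + 1) [(y, x)] 0 (st.1.add (y, x))).1)])
            else st) (seen, outB)).1 := by
  intro xs
  induction xs with
  | nil =>
    intro _ vis outA seen outB hrel hout
    exact ⟨hout, hrel⟩
  | cons x rest ih =>
    intro hxs vis outA seen outB hrel hout
    obtain ⟨hx0, hx1⟩ := hxs x (List.mem_cons_self ..)
    have hrest := fun z hz => hxs z (List.mem_cons_of_mem _ hz)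
    simp only [List.foldl_cons]
    have hgc := hrel.2.2 y x hy0 hy1 hx0 hx1
    by_cases hstart : (cellAt arr y x == num && !(visGet vis y x)) = true
    · have hstartB : (cellAt arr y x == num && !(seen.contains (y, x))) = true := by
        rw [← hgc]; exact hstart
      rw [if_pos hstart, if_pos hstartB]
      have hvg : visGet vis y x = false := by
        cases hv : visGet vis y x
        · rfl
        · rw [hv] at hstart; simp at hstart
      have hrel1 : RelV l (visSet vis y x) (seen.add (y, x)) :=
        relv_visSet_add hrel hy0 hy1 hx0 hx1
      have hfc : falseCount (visSet vis y x) + 1 ≤ l.toNat * l.toNat := by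
        have := visSet_falseCount vis y x hy0 hx0 hvg
        have hle := relv_falseCount_le hrel
        omega
      have hsim := bfs_sim (l := l) arr num (l.toNat * l.toNat + 1) [(y, x)]
        (visSet vis y x) [] (seen.add (y, x)) hrel1
        (by simp only [List.length_cons, List.length_nil]; omega)
      simp only [List.nil_append, List.length_nil] at hsim
      obtain ⟨he, hrel2⟩ := hsim
      exact ih hrest _ _ _ _ hrel2 (by rw [hout, he, mzB_eq])
    · have hstartB : ¬ (cellAt arr y x == num && !(seen.contains (y, x))) = true := by
        rw [← hgc]; exact hstart
      rw [if_neg hstart, if_neg hstartB]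
      exact ih hrest vis outA seen outB hrel hout

theorem scan_outer_sim {l : Int} (arr : List (List Int)) (num : Int) :
    ∀ (ys : List Int), (∀ y ∈ ys, 0 ≤ y ∧ y < l) →
    ∀ (vis : List (List Bool)) (outA : List PShape) (seen : PySem.Set (Int × Int))
      (outB : List PShape), RelV l vis seen → outB = outA →
      (ys.foldl (fun (st : PySem.Set (Int × Int) × List PShape) y =>
        (PySem.List.pyRange 0 l 1).foldl (fun (st : PySem.Set (Int × Int) × List PShape) x =>
          if (cellAt arr y x == num && !(st.1.contains (y, x))) = true then
            ((bfsB arr num l (l.toNat * l.toNat + 1) [(y, x)] 0 (st.1.add (y, x))).2,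
             st.2 ++ [mzB (sortShape
               (bfsB arr num l (l.toNat * l.toNat + 1) [(y, x)] 0 (st.1.add (y, x))).1)])
          else st) st) (seen, outB)).2
        = (ys.foldl (fun (st : List (List Bool) × List PShape) y =>
            (PySem.List.pyRange 0 l 1).foldl (fun (st : List (List Bool) × List PShape) x =>
              if (cellAt arr y x == num && !(visGet st.1 y x)) = true then
                ((bfs arr num l [(y, x)] (visSet st.1 y x) []).2,
                 st.2 ++ [mzA (sortShape (bfs arr num l [(y, x)] (visSet st.1 y x) []).1)])
              else st) st) (vis, outA)).2 := by
  intro ys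
  induction ys with
  | nil => intro _ vis outA seen outB _ hout; exact hout
  | cons y rest ih =>
    intro hys vis outA seen outB hrel hout
    obtain ⟨hy0, hy1⟩ := hys y (List.mem_cons_self ..)
    simp only [List.foldl_cons]
    have hxs : ∀ x ∈ PySem.List.pyRange 0 l 1, 0 ≤ x ∧ x < l := by
      intro x hx
      exact PySem.List.mem_pyRange_one.mp hx
    obtain ⟨hout', hrel'⟩ :=
      scan_inner_sim arr num y hy0 hy1 (PySem.List.pyRange 0 l 1) hxs vis outA seen outB
        hrel hout
    exact ih (fun z hz => hys z (List.mem_cons_of_mem _ hz)) _ _ _ _ hrel' hout'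

theorem finding_eq (arr : List (List Int)) (num l : Int) :
    findingB arr num l = finding arr num l := by
  have hrel0 : RelV l ((PySem.List.pyRange 0 l 1).map (fun _ => PySem.List.pyRepeat [false] l))
      PySem.Set.empty := by
    refine ⟨?_, ?_, ?_⟩
    · rw [List.length_map, PySem.List.length_pyRange_one]
      omega
    · intro i hi
      rw [List.length_map] at hi
      rw [List.getD_eq_getElem?_getD, List.getElem?_map,
        List.getElem?_eq_getElem hi]
      simp [PySem.List.pyRepeat_singleton]
    · intro y x hy0 hy1 hx0 hx1
      have hylt : y.toNat < (PySem.List.pyRange 0 l 1).length := by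
        rw [PySem.List.length_pyRange_one]; omega
      unfold visGet
      rw [PySem.List.pyGetD_of_nonneg _ _ hy0, PySem.List.pyGetD_of_nonneg _ _ hx0]
      have hrow : (List.map (fun _ => PySem.List.pyRepeat [false] l)
            (PySem.List.pyRange 0 l 1)).getD y.toNat []
          = List.replicate l.toNat false := by
        rw [List.getD_eq_getElem?_getD, List.getElem?_map, List.getElem?_eq_getElem hylt]
        simp [PySem.List.pyRepeat_singleton]
      rw [hrow, List.getD_eq_getElem?_getD, List.getElem?_eq_getElem
        (by rw [List.length_replicate]; omega)]
      simp [PySem.Set.contains, PySem.Set.empty]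
  have h := scan_outer_sim (l := l) arr num (PySem.List.pyRange 0 l 1)
    (fun y hy => PySem.List.mem_pyRange_one.mp hy)
    ((PySem.List.pyRange 0 l 1).map (fun _ => PySem.List.pyRepeat [false] l)) []
    PySem.Set.empty [] hrel0 rfl
  exact h

-- ---- the matching phases agree (A's pair-rescanning loop = B's dict one-pass) ----
theorem findJA_some_mem {blocks spaces : List PShape} {i : Int} {filled : List Int} {j : Int}
    (h : findJA blocks spaces i filled = some j) : j ∈ filled := by
  induction filled with
  | nil => simp [findJA] at h
  | cons a t ih =>
    simp only [findJA] at h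
    split at h
    · cases h; exact List.mem_cons_self ..
    · exact List.mem_cons_of_mem _ (ih h)

theorem loopA_none {blocks spaces : List PShape} {used filled : List Int} {ans : Int}
    (h : findPairA blocks spaces filled used = none) :
    loopA blocks spaces used filled ans = ans := by
  rw [loopA]
  split
  · next ij heq => rw [h] at heq; cases heq
  · rfl

theorem loopA_some {blocks spaces : List PShape} {used filled : List Int} {ans : Int}
    {ij : Int × Int} (h : findPairA blocks spaces filled used = some ij) :
    loopA blocks spaces used filled ans =
      loopA blocks spaces ((PySem.List.remove? used ij.1).getD used)
        ((PySem.List.remove? filled ij.2).getD filled)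
        (ans + PySem.List.len (PySem.List.pyGetD blocks ij.1 [])) := by
  rw [loopA]
  split
  · next ij' heq =>
    rw [h] at heq
    injection heq with hh
    subst hh
    rfl
  · next heq => rw [h] at heq; cases heq

-- A's effective matching pass, on block VALUES: for each block in order, take the first
-- remaining hole whose normalized form is one of the block's 4 rotation forms
def passA (spaces : List PShape) : List PShape → List Int → Int
  | [], _ => 0
  | b :: bs, filled =>
    match filled.find? (fun j => (rotationA b).contains (PySem.List.pyGetD spaces j [])) with
    | some j => PySem.List.len b + passA spaces bs (filled.erase j)
    | none => passA spaces bs filled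

theorem findJA_eq_find? (blocks spaces : List PShape) (i : Int) (filled : List Int) :
    findJA blocks spaces i filled =
      filled.find? (fun j =>
        (rotationA (PySem.List.pyGetD blocks i [])).contains (PySem.List.pyGetD spaces j [])) := by
  induction filled with
  | nil => rfl
  | cons a t ih =>
    simp only [findJA, List.find?_cons]
    cases hc : (rotationA (PySem.List.pyGetD blocks i [])).contains (PySem.List.pyGetD spaces a []) with
    | true => simp
    | false => simp [ih]

theorem findJA_none_mono {blocks spaces : List PShape} {i : Int} {f f' : List Int}
    (hsub : ∀ j ∈ f', j ∈ f) (h : findJA blocks spaces i f = none) :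
    findJA blocks spaces i f' = none := by
  rw [findJA_eq_find?] at h ⊢
  exact List.find?_eq_none.mpr (fun j hj => List.find?_eq_none.mp h j (hsub j hj))

theorem loopA_drop (blocks spaces : List PShape) :
    ∀ (n : Nat) (filled : List Int), filled.length = n →
      ∀ (i : Int) (used : List Int) (ans : Int), findJA blocks spaces i filled = none →
        loopA blocks spaces (i :: used) filled ans = loopA blocks spaces used filled ans := by
  intro n
  induction n using Nat.strong_induction_on with
  | _ n ih =>
    intro filled hlen i used ans hnone
    have hpair : findPairA blocks spaces filled (i :: used) = findPairA blocks spaces filled used := by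
      simp [findPairA, hnone]
    cases hp : findPairA blocks spaces filled used with
    | none => rw [loopA_none (hpair.trans hp), loopA_none hp]
    | some ij =>
      rw [loopA_some (hpair.trans hp), loopA_some hp]
      obtain ⟨hmem, hJA⟩ := findPairA_some hp
      have hne : ij.1 ≠ i := by
        rintro rfl
        rw [hJA] at hnone
        cases hnone
      have hj : ij.2 ∈ filled := findJA_some_mem hJA
      rw [remove?_getD_erase (List.mem_cons_of_mem _ hmem), remove?_getD_erase hmem,
        remove?_getD_erase hj, List.erase_cons_tail (by simpa using fun hc => hne hc.symm)]
      exact ih (filled.erase ij.2).length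
        (by rw [List.length_erase_of_mem hj]; have := List.length_pos_of_mem hj; omega)
        (filled.erase ij.2) rfl i (used.erase ij.1) _
        (findJA_none_mono (fun j hjm => (List.erase_sublist).subset hjm) hnone)

theorem loopA_pass (blocks spaces : List PShape) :
    ∀ (used filled : List Int) (ans : Int),
      loopA blocks spaces used filled ans =
        ans + passA spaces (used.map (fun i => PySem.List.pyGetD blocks i [])) filled := by
  intro used
  induction used with
  | nil =>
    intro filled ans
    rw [loopA_none (by simp [findPairA])]
    simp [passA]
  | cons i rest ih =>
    intro filled ans
    cases hj : findJA blocks spaces i filled with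
    | some j =>
      have hpair : findPairA blocks spaces filled (i :: rest) = some (i, j) := by
        simp [findPairA, hj]
      rw [loopA_some hpair]
      have hjm : j ∈ filled := findJA_some_mem hj
      rw [remove?_getD_erase (List.mem_cons_self ..), List.erase_cons_head,
        remove?_getD_erase hjm]
      rw [ih (filled.erase j) (ans + PySem.List.len (PySem.List.pyGetD blocks i []))]
      simp only [List.map_cons, passA, ← findJA_eq_find?, hj]
      omega
    | none =>
      rw [loopA_drop blocks spaces filled.length filled rfl i rest ans hj,
        ih filled ans]
      simp only [List.map_cons, passA, ← findJA_eq_find?, hj]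

-- the dict invariant of B's pass: every bucket is exactly the remaining hole indices of
-- that normalized form, ascending
def InvB (spaces : List PShape) (filled : List Int) (d : PySem.Dict PShape (List Int)) : Prop :=
  filled.Pairwise (· < ·) ∧
    ∀ k, d.getD k [] = filled.filter (fun j => PySem.List.pyGetD spaces j [] == k)

theorem buildIndex_getD (spaces : List PShape) (k : PShape) :
    (buildIndex spaces).getD k [] =
      (PySem.List.pyRange 0 (PySem.List.len spaces) 1).filter
        (fun j => PySem.List.pyGetD spaces j [] == k) := by
  unfold buildIndex
  rw [PySem.List.enumerate_eq_map_pyRange spaces [], List.foldl_map]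
  have h := PySem.Dict.getD_foldl_modify_append
    ((PySem.List.pyRange 0 (PySem.List.len spaces) 1).map
      (fun j => (PySem.List.pyGetD spaces j [], j)))
    (PySem.Dict.empty : PySem.Dict PShape (List Int)) k
  rw [List.foldl_map] at h
  dsimp only at h
  rw [h, List.filter_map, List.map_map]
  simp [Function.comp_def]

theorem find?_congr_mem {l : List Int} {p q : Int → Bool} (h : ∀ x ∈ l, p x = q x) :
    l.find? p = l.find? q := by
  induction l with
  | nil => rfl
  | cons x t ih =>
    simp only [List.find?_cons, h x (List.mem_cons_self ..)]
    cases q x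
    · exact ih (fun y hy => h y (List.mem_cons_of_mem _ hy))
    · rfl

theorem find?_min_sorted {l : List Int} {p : Int → Bool} {j : Int}
    (hs : l.Pairwise (· < ·)) (h : l.find? p = some j) :
    p j = true ∧ j ∈ l ∧ ∀ j' ∈ l, p j' = true → j ≤ j' := by
  induction l with
  | nil => simp at h
  | cons x t ih =>
    rw [List.find?_cons] at h
    cases hx : p x with
    | true =>
      rw [hx] at h
      cases h
      refine ⟨hx, List.mem_cons_self .., ?_⟩
      intro j' hj' _
      rcases List.mem_cons.mp hj' with rfl | hm
      · exact le_refl _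
      · exact le_of_lt ((List.pairwise_cons.mp hs).1 j' hm)
    | false =>
      rw [hx] at h
      obtain ⟨h1, h2, h3⟩ := ih (List.pairwise_cons.mp hs).2 h
      refine ⟨h1, List.mem_cons_of_mem _ h2, ?_⟩
      intro j' hj' hpj'
      rcases List.mem_cons.mp hj' with rfl | hm
      · rw [hpj'] at hx; cases hx
      · exact h3 j' hm hpj'

theorem find?_eq_some_of_min {l : List Int} {p : Int → Bool} {j : Int}
    (hs : l.Pairwise (· < ·)) (hj : j ∈ l) (hpj : p j = true)
    (hmin : ∀ j' ∈ l, p j' = true → j ≤ j') : l.find? p = some j := by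
  induction l with
  | nil => simp at hj
  | cons x t ih =>
    rw [List.find?_cons]
    cases hx : p x with
    | true =>
      have hxj : j = x := by
        rcases List.mem_cons.mp hj with rfl | hm
        · rfl
        · have h1 := hmin x (List.mem_cons_self ..) hx
          have h2 := (List.pairwise_cons.mp hs).1 j hm
          omega
      rw [hxj]
    | false =>
      have hjt : j ∈ t := by
        rcases List.mem_cons.mp hj with rfl | hm
        · rw [hpj] at hx; cases hx
        · exact hm
      exact ih (List.pairwise_cons.mp hs).2 hjt
        (fun j' hj' hpj' => hmin j' (List.mem_cons_of_mem _ hj') hpj')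

theorem filter_erase_int (l : List Int) (a : Int) (q : Int → Bool) (hnd : l.Nodup) :
    (l.erase a).filter q = if q a then (l.filter q).erase a else l.filter q := by
  induction l with
  | nil => simp
  | cons x t ih =>
    have hnd' : t.Nodup := (List.nodup_cons.mp hnd).2
    have iht := ih hnd'
    by_cases hxa : x = a
    · subst hxa
      rw [List.erase_cons_head]
      by_cases hq : q x = true
      · rw [if_pos hq, List.filter_cons_of_pos hq, List.erase_cons_head]
      · rw [if_neg hq, List.filter_cons_of_neg hq]
    · have hbeq : ¬(x == a) = true := by simpa using hxa
      rw [List.erase_cons_tail hbeq]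
      by_cases hq : q a = true
      · rw [if_pos hq] at iht ⊢
        by_cases hqx : q x = true
        · rw [List.filter_cons_of_pos hqx, List.filter_cons_of_pos hqx, iht,
            List.erase_cons_tail hbeq]
        · rw [List.filter_cons_of_neg hqx, List.filter_cons_of_neg hqx, iht]
      · rw [if_neg hq] at iht ⊢
        by_cases hqx : q x = true
        · rw [List.filter_cons_of_pos hqx, List.filter_cons_of_pos hqx, iht]
        · rw [List.filter_cons_of_neg hqx, List.filter_cons_of_neg hqx, iht]

-- the bestBucket fold, with a generalized accumulator: after scanning the forms F the
-- running best is the (mapped) first remaining hole index matching some form of F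
theorem bestBucket_go {spaces : List PShape} {filled : List Int}
    {d : PySem.Dict PShape (List Int)} (hs : filled.Pairwise (· < ·))
    (hb : ∀ k, d.getD k [] = filled.filter (fun j => PySem.List.pyGetD spaces j [] == k)) :
    ∀ (forms F : List PShape),
      forms.foldl (fun best k =>
        match d.getD k [] with
        | [] => best
        | j :: _ =>
          match best with
          | none => some k
          | some bk => if j < (d.getD bk []).headD 0 then some k else some bk)
        ((filled.find? (fun j => F.contains (PySem.List.pyGetD spaces j []))).map
          (fun j => PySem.List.pyGetD spaces j []))
      = (filled.find? (fun j => (F ++ forms).contains (PySem.List.pyGetD spaces j []))).map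
          (fun j => PySem.List.pyGetD spaces j []) := by
  intro forms
  induction forms with
  | nil => intro F; simp
  | cons k rest ih =>
    intro F
    rw [List.foldl_cons, hb k]
    cases hfl : filled.filter (fun j => PySem.List.pyGetD spaces j [] == k) with
    | nil =>
      have hcong : filled.find? (fun j => F.contains (PySem.List.pyGetD spaces j []))
          = filled.find? (fun j => (F ++ [k]).contains (PySem.List.pyGetD spaces j [])) := by
        apply find?_congr_mem
        intro x hx
        have hnk := List.filter_eq_nil_iff.mp hfl x hx
        simp only [beq_iff_eq] at hnk
        simp [List.contains_eq_mem, hnk]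
      dsimp only
      rw [hcong]
      have h2 := ih (F ++ [k])
      simp only [List.append_assoc, List.singleton_append] at h2
      exact h2
    | cons j t =>
      have hfk : filled.find? (fun j' => PySem.List.pyGetD spaces j' [] == k) = some j := by
        rw [← List.head?_filter, hfl]; rfl
      obtain ⟨hpj, hjm, hjmin⟩ := find?_min_sorted hs hfk
      have hSjk : PySem.List.pyGetD spaces j [] = k := by simpa using hpj
      dsimp only
      cases hacc : filled.find? (fun j' => F.contains (PySem.List.pyGetD spaces j' [])) with
      | none =>
        have hcomb : filled.find?
            (fun j' => (F ++ [k]).contains (PySem.List.pyGetD spaces j' [])) = some j := by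
          apply find?_eq_some_of_min hs hjm
          · simp [List.contains_eq_mem, hSjk]
          · intro j' hj' hp'
            have hnoF := List.find?_eq_none.mp hacc j' hj'
            simp only [List.contains_eq_mem, List.mem_append, List.mem_singleton,
              decide_eq_true_eq] at hp' hnoF
            have : PySem.List.pyGetD spaces j' [] = k := by tauto
            exact hjmin j' hj' (by simp [this])
        simp only [Option.map_none]
        have h2 := ih (F ++ [k])
        rw [hcomb] at h2
        simp only [Option.map_some, hSjk, List.append_assoc, List.singleton_append] at h2
        exact h2
      | some j0 =>
        obtain ⟨hpj0, hj0m, hj0min⟩ := find?_min_sorted hs hacc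
        have hfj0 : filled.find?
            (fun j' => PySem.List.pyGetD spaces j' [] == PySem.List.pyGetD spaces j0 [])
            = some j0 := by
          apply find?_eq_some_of_min hs hj0m (by simp)
          intro j' hj' hp'
          have hS : PySem.List.pyGetD spaces j' [] = PySem.List.pyGetD spaces j0 [] := by
            simpa using hp'
          apply hj0min j' hj'
          rw [hS]
          exact hpj0
        have hheadD : (d.getD (PySem.List.pyGetD spaces j0 []) []).headD 0 = j0 := by
          rw [hb _]
          simp [List.headD_eq_head?_getD, List.head?_filter, hfj0]
        simp only [Option.map_some]
        rw [hheadD]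
        by_cases hlt : j < j0
        · rw [if_pos hlt]
          have hcomb : filled.find?
              (fun j' => (F ++ [k]).contains (PySem.List.pyGetD spaces j' [])) = some j := by
            apply find?_eq_some_of_min hs hjm
            · simp [List.contains_eq_mem, hSjk]
            · intro j' hj' hp'
              simp only [List.contains_eq_mem, List.mem_append, List.mem_singleton,
                decide_eq_true_eq] at hp'
              rcases hp' with hF | hk
              · have := hj0min j' hj' (by simp [List.contains_eq_mem, hF]); omega
              · exact hjmin j' hj' (by simp [hk])
          have h2 := ih (F ++ [k])
          rw [hcomb] at h2
          simp only [Option.map_some, hSjk, List.append_assoc, List.singleton_append] at h2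
          exact h2
        · rw [if_neg hlt]
          have hj0F : PySem.List.pyGetD spaces j0 [] ∈ F := by
            simpa [List.contains_eq_mem] using hpj0
          have hcomb : filled.find?
              (fun j' => (F ++ [k]).contains (PySem.List.pyGetD spaces j' [])) = some j0 := by
            apply find?_eq_some_of_min hs hj0m
            · simp [List.contains_eq_mem, hj0F]
            · intro j' hj' hp'
              simp only [List.contains_eq_mem, List.mem_append, List.mem_singleton,
                decide_eq_true_eq] at hp'
              rcases hp' with hF | hk
              · exact hj0min j' hj' (by simp [List.contains_eq_mem, hF])
              · have := hjmin j' hj' (by simp [hk]); omega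
          have h2 := ih (F ++ [k])
          rw [hcomb] at h2
          simp only [Option.map_some, List.append_assoc, List.singleton_append] at h2
          exact h2

theorem bestBucket_spec {spaces : List PShape} {filled : List Int}
    {d : PySem.Dict PShape (List Int)} (hInv : InvB spaces filled d) (forms : List PShape) :
    bestBucket d forms =
      (filled.find? (fun j => forms.contains (PySem.List.pyGetD spaces j []))).map
        (fun j => PySem.List.pyGetD spaces j []) := by
  have h := bestBucket_go hInv.1 hInv.2 forms []
  have hnil : filled.find?
      (fun j => ([] : List PShape).contains (PySem.List.pyGetD spaces j [])) = none :=
    List.find?_eq_none.mpr (by simp)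
  rw [hnil, List.nil_append] at h
  simpa [bestBucket] using h

theorem foldB_pass (spaces : List PShape) :
    ∀ (bs : List PShape) (filled : List Int) (d : PySem.Dict PShape (List Int)) (ans : Int),
      InvB spaces filled d →
      (bs.foldl stepB (d, ans)).2 = ans + passA spaces bs filled := by
  intro bs
  induction bs with
  | nil => intro filled d ans _; simp [passA]
  | cons b bs ih =>
    intro filled d ans hInv
    obtain ⟨hsort, hbuck⟩ := hInv
    rw [List.foldl_cons]
    cases hf : filled.find?
        (fun j => (rotationA b).contains (PySem.List.pyGetD spaces j [])) with
    | none =>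
      have hbb : bestBucket d (rotB 4 b) = none := by
        rw [rotB_eq, bestBucket_spec ⟨hsort, hbuck⟩, hf]; rfl
      have hstep : stepB (d, ans) b = (d, ans) := by simp [stepB, hbb]
      rw [hstep, ih filled d ans ⟨hsort, hbuck⟩]
      simp only [passA, hf]
    | some j =>
      have hbb : bestBucket d (rotB 4 b)
          = some (PySem.List.pyGetD spaces j []) := by
        rw [rotB_eq, bestBucket_spec ⟨hsort, hbuck⟩, hf]; rfl
      have hstep : stepB (d, ans) b
          = (d.insert (PySem.List.pyGetD spaces j [])
              ((d.getD (PySem.List.pyGetD spaces j []) []).tail),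
             ans + PySem.List.len b) := by
        simp [stepB, hbb]
      obtain ⟨hpj, hjm, hjmin⟩ := find?_min_sorted hsort hf
      have hnd : filled.Nodup := hsort.imp ne_of_lt
      have hfj : filled.find?
          (fun j' => PySem.List.pyGetD spaces j' [] == PySem.List.pyGetD spaces j [])
          = some j := by
        apply find?_eq_some_of_min hsort hjm (by simp)
        intro j' hj' hp'
        have hS : PySem.List.pyGetD spaces j' [] = PySem.List.pyGetD spaces j [] := by
          simpa using hp'
        apply hjmin j' hj'
        rw [hS]
        exact hpj
      have hhead : (filled.filter
          (fun j' => PySem.List.pyGetD spaces j' [] == PySem.List.pyGetD spaces j [])).head?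
          = some j := by rw [List.head?_filter]; exact hfj
      have hInv' : InvB spaces (filled.erase j)
          (d.insert (PySem.List.pyGetD spaces j [])
            ((d.getD (PySem.List.pyGetD spaces j []) []).tail)) := by
        constructor
        · exact List.Pairwise.sublist (List.erase_sublist) hsort
        · intro k
          rw [PySem.Dict.getD_insert]
          by_cases hk : k = PySem.List.pyGetD spaces j []
          · rw [hk, if_pos rfl, hbuck, filter_erase_int filled j _ hnd, if_pos (by simp)]
            cases hflt : filled.filter
                (fun j' => PySem.List.pyGetD spaces j' []
                  == PySem.List.pyGetD spaces j []) with
            | nil => rw [hflt] at hhead; cases hhead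
            | cons a u =>
              rw [hflt] at hhead
              have haj : a = j := by simpa using hhead
              subst haj
              rw [List.tail_cons, List.erase_cons_head]
          · rw [if_neg hk, hbuck k, filter_erase_int filled j _ hnd,
              if_neg (by simp [beq_iff_eq]; exact fun hc => hk hc.symm)]
      rw [hstep, ih (filled.erase j) _ (ans + PySem.List.len b) hInv']
      simp only [passA, hf]
      omega

theorem core_eq (blocks spaces : List PShape) :
    loopA blocks spaces (PySem.List.pyRange 0 (PySem.List.len blocks) 1)
        (PySem.List.pyRange 0 (PySem.List.len spaces) 1) 0 =
      (blocks.foldl stepB (buildIndex spaces, 0)).2 := by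
  rw [loopA_pass, PySem.List.map_pyGetD_pyRange_zero blocks []]
  rw [foldB_pass spaces blocks (PySem.List.pyRange 0 (PySem.List.len spaces) 1)
    (buildIndex spaces) 0
    ⟨PySem.List.pairwise_lt_pyRange_one 0 (PySem.List.len spaces),
     fun k => buildIndex_getD spaces k⟩]

-- ===== VERDICT (by name: the statement is the Claim_ definition above) =====
theorem solution_spec : Claim_equal_solution := by
  intro game_board table _ _
  show solution game_board table = solution_alt game_board table
  show loopA (finding table 1 (PySem.List.len table))
      (finding game_board 0 (PySem.List.len table))
      (PySem.List.pyRange 0 (PySem.List.len (finding table 1 (PySem.List.len table))) 1)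
      (PySem.List.pyRange 0 (PySem.List.len (finding game_board 0 (PySem.List.len table))) 1) 0
    = ((findingB table 1 (PySem.List.len table)).foldl stepB
        (buildIndex (findingB game_board 0 (PySem.List.len table)), 0)).2
  rw [finding_eq, finding_eq]
  exact core_eq _ _
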